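-- pv_equiv track=rewrite | github.com/juanauli/Inversion-Sequences-Consecutive-Patterns-of-Length-3 | count_consec_patterns3.py | count000
-- ===== SOURCE A (Python) =====
-- def count000(sequence):
--     index = 0
--     counter = 0
--     while index < len(sequence) - 2:
--         if sequence[index] == sequence[index + 1] == sequence[index + 2]:
--             counter += 1
--         index += 1
--     return counter
-- ===== SOURCE B (Python) =====
-- def count000(sequence):
--     # single pass maintaining the length of the current run of equal elements
--     counter = 0
--     run = 0
--     prev = None
--     have_prev = False
--     for x in sequence:
--         if have_prev and x == prev:
--             run += 1
--         else:
--             run = 1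
--         if run >= 3:
--             counter += 1
--         prev = x
--         have_prev = True
--     return counter
-- ===== Notes on version B (the rewrite author's own statement) =====
-- stated objective: faster
-- what changed: B replaces A's index loop that re-tests each consecutive triple sequence[i]==sequence[i+1]==sequence[i+2] with a single pass maintaining the current run length of equal adjacent elements, counting one each time the run length reaches 3 or more.
import Mathlib
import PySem

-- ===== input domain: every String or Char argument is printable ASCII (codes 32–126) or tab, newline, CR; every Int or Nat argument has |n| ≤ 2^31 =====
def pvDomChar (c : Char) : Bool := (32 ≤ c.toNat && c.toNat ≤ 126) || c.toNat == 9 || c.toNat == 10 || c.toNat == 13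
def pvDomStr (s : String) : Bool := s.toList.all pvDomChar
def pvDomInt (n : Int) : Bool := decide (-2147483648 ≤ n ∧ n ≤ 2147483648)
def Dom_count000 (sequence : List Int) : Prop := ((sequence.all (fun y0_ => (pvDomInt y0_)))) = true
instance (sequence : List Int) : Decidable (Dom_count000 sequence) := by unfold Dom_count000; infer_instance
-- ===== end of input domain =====

-- B maintains a run length of equal adjacent elements instead of re-testing each consecutive triple.

-- ===== PORT A =====
-- the while loop of A, step for step: index walks 0,1,… while index < len-2,
-- testing the chained comparison sequence[index] == sequence[index+1] == sequence[index+2]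
def count000Loop (sequence : List Int) (index counter : Int) : Int :=
  if h : index < (sequence.length : Int) - 2 then
    count000Loop sequence (index + 1)
      (if PySem.List.pyGet? sequence index = PySem.List.pyGet? sequence (index + 1) ∧
          PySem.List.pyGet? sequence (index + 1) = PySem.List.pyGet? sequence (index + 2)
       then counter + 1 else counter)
  else counter
termination_by ((sequence.length : Int) - 2 - index).toNat

def count000 (sequence : List Int) : Int := count000Loop sequence 0 0

-- ===== PORT B =====
-- one fold over the list; state = (have_prev, prev, run, counter)
def count000AltStep (s : Bool × Int × Int × Int) (x : Int) : Bool × Int × Int × Int :=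
  let run := if s.1 ∧ x = s.2.1 then s.2.2.1 + 1 else 1
  (true, x, run, if run ≥ 3 then s.2.2.2 + 1 else s.2.2.2)

def count000_alt (sequence : List Int) : Int :=
  (sequence.foldl count000AltStep (false, 0, 0, 0)).2.2.2

-- ===== PRECONDITION & SPEC =====
def Spec_count000 (sequence : List Int) (out : Int) : Prop := out = count000_alt sequence
instance (sequence : List Int) (out : Int) : Decidable (Spec_count000 sequence out) := by unfold Spec_count000; infer_instance

-- ===== CLAIM (what is proved, stated in full; the proofs are below) =====
def Claim_equal_count000 : Prop := ∀ (sequence : List Int), Dom_count000 sequence → Spec_count000 sequence (count000 sequence)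

-- ===== LEMMAS AND PROOFS =====

-- reference count: number of consecutive equal triples
def triples : List Int → Int
  | x :: y :: z :: r => (if x = y ∧ y = z then 1 else 0) + triples (y :: z :: r)
  | _ => 0

-- run-count with only the relevant bit of history: b = "the previous two elements were equal"
def runCnt (p : Int) (b : Bool) : List Int → Int
  | [] => 0
  | x :: xs => if x = p then (if b then 1 else 0) + runCnt x true xs
               else runCnt x false xs

theorem runCnt_eq_triples (rest : List Int) : ∀ (x y : Int),
    runCnt y (decide (x = y)) rest = triples (x :: y :: rest) := by
  induction rest with
  | nil => intro x y; simp [runCnt, triples]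
  | cons z r ih =>
    intro x y
    by_cases hzy : z = y
    · subst hzy
      by_cases hxy : x = z <;>
        simp [runCnt, triples, hxy, ← ih z z]
    · have hxz : triples (x :: y :: z :: r) = triples (y :: z :: r) := by
        simp [triples]
        intro h1 h2; exact absurd h2.symm hzy
      rw [hxz, ← ih y z]
      simp [runCnt, hzy, eq_comm]

-- the fold of B from a reached state computes counter + runCnt
theorem foldl_step_eq (l : List Int) : ∀ (p r c : Int), 1 ≤ r →
    (l.foldl count000AltStep (true, p, r, c)).2.2.2 = c + runCnt p (decide (2 ≤ r)) l := by
  induction l with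
  | nil => intro p r c _; simp [runCnt]
  | cons x xs ih =>
    intro p r c hr
    by_cases hx : x = p
    · subst hx
      have step : count000AltStep (true, x, r, c) x
          = (true, x, r + 1, if r + 1 ≥ 3 then c + 1 else c) := by simp [count000AltStep]
      show (xs.foldl count000AltStep (count000AltStep (true, x, r, c) x)).2.2.2 = _
      rw [step, ih x (r + 1) _ (by omega),
        show decide (2 ≤ r + 1) = true by simp; omega]
      simp [runCnt]
      split_ifs <;> omega
    · have step : count000AltStep (true, p, r, c) x
          = (true, x, 1, if (1 : Int) ≥ 3 then c + 1 else c) := by simp [count000AltStep, hx]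
      show (xs.foldl count000AltStep (count000AltStep (true, p, r, c) x)).2.2.2 = _
      rw [step, ih x 1 _ (by omega)]
      simp [runCnt, hx]

theorem alt_eq_triples (sequence : List Int) : count000_alt sequence = triples sequence := by
  cases sequence with
  | nil => simp [count000_alt, triples]
  | cons x xs =>
    cases xs with
    | nil => simp [count000_alt, count000AltStep, triples]
    | cons y ys =>
      show (((y :: ys).foldl count000AltStep (count000AltStep (false, 0, 0, 0) x))).2.2.2 = _
      have : count000AltStep (false, 0, 0, 0) x = (true, x, 1, 0) := by
        simp [count000AltStep]
      rw [this]
      show ((ys.foldl count000AltStep (count000AltStep (true, x, 1, 0) y))).2.2.2 = _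
      by_cases hxy : y = x
      · have : count000AltStep (true, x, 1, 0) y = (true, y, 2, 0) := by
          simp [count000AltStep, hxy]
        rw [this, foldl_step_eq ys y 2 0 (by omega), ← runCnt_eq_triples ys x y]
        simp [hxy]
      · have : count000AltStep (true, x, 1, 0) y = (true, y, 1, 0) := by
          simp [count000AltStep, hxy]
        rw [this, foldl_step_eq ys y 1 0 (by omega), ← runCnt_eq_triples ys x y,
          show decide (x = y) = false from decide_eq_false fun h => hxy h.symm]
        simp

theorem triples_head (x y z : Int) (r : List Int) :
    triples (x :: y :: z :: r) = (if x = y ∧ y = z then 1 else 0) + triples (y :: z :: r) := rfl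

-- A's loop counts the triples of the dropped suffix
theorem loop_eq_triples (sequence : List Int) (i c : Int) (hi : 0 ≤ i) :
    count000Loop sequence i c = c + triples (sequence.drop i.toNat) := by
  rw [count000Loop]
  split
  · next h =>
    have hlen : i.toNat + 2 < sequence.length := by omega
    have hx : ∃ x y z r, sequence.drop i.toNat = x :: y :: z :: r := by
      rcases e : sequence.drop i.toNat with _ | ⟨x, _ | ⟨y, _ | ⟨z, r⟩⟩⟩ <;>
        first
          | (exfalso; have := List.length_drop (l := sequence) (i := i.toNat); rw [e] at this; simp at this; omega)
          | exact ⟨x, y, z, r, rfl⟩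
    obtain ⟨x, y, z, r, e⟩ := hx
    have g0 : PySem.List.pyGet? sequence i = some x := by
      rw [PySem.List.pyGet?_of_nonneg sequence hi, ← Nat.add_zero i.toNat,
        ← List.getElem?_drop, e]; rfl
    have g1 : PySem.List.pyGet? sequence (i + 1) = some y := by
      rw [PySem.List.pyGet?_of_nonneg sequence (by omega),
        show (i + 1).toNat = i.toNat + 1 by omega, ← List.getElem?_drop, e]; rfl
    have g2 : PySem.List.pyGet? sequence (i + 2) = some z := by
      rw [PySem.List.pyGet?_of_nonneg sequence (by omega),
        show (i + 2).toNat = i.toNat + 2 by omega, ← List.getElem?_drop, e]; rfl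
    have hdrop : sequence.drop (i + 1).toNat = y :: z :: r := by
      rw [show (i+1).toNat = i.toNat + 1 by omega, ← List.drop_drop, e]; rfl
    rw [loop_eq_triples sequence (i + 1) _ (by omega), hdrop, e, triples_head, g0, g1, g2]
    by_cases hc : x = y ∧ y = z <;> simp [hc] <;> omega
  · next h =>
    have : triples (sequence.drop i.toNat) = 0 := by
      rcases e : sequence.drop i.toNat with _ | ⟨x, _ | ⟨y, _ | ⟨z, r⟩⟩⟩ <;>
        first
          | rfl
          | (exfalso; have hl := List.length_drop (l := sequence) (i := i.toNat); rw [e] at hl; simp at hl; omega)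
    omega
termination_by ((sequence.length : Int) - 2 - i).toNat
decreasing_by omega

-- ===== VERDICT (by name: the statement is the Claim_ definition above) =====
theorem count000_spec : Claim_equal_count000 := by
  intro sequence _
  unfold Spec_count000 count000
  rw [loop_eq_triples sequence 0 0 (by omega), alt_eq_triples]
  simp
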